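-- pv_equiv track=rewrite | github.com/shao3d/Experts_panel | backend/src/utils/entities_converter.py | _convert_entity_to_markdown
-- ===== SOURCE A (Python) =====
-- from typing import List, Dict, Any, Union, Optional
--
-- def _convert_entity_to_markdown(entity_type: str, text: str, entity: Dict[str, Any]) -> str:
--     """
--     Convert a single JSON entity to markdown.
--
--     Args:
--         entity_type: Type of entity (text_link, bold, italic, etc.)
--         text: Text content of the entity
--         entity: Full entity dict (may contain additional fields like href)
--
--     Returns:
--         Markdown-formatted text
--     """
--     if entity_type == 'plain':
--         return text
--
--     elif entity_type == 'text_link':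
--         # [text](href)
--         href = entity.get('href', '')
--         return f'[{text}]({href})'
--
--     elif entity_type == 'link':
--         # Plain URL - return as-is (ReactMarkdown will autolink)
--         return text
--
--     elif entity_type == 'bold':
--         # **text**
--         return f'**{text}**'
--
--     elif entity_type == 'italic':
--         # *text*
--         return f'*{text}*'
--
--     elif entity_type == 'code':
--         # `text`
--         return f'`{text}`'
--
--     elif entity_type == 'pre':
--         # ```text```
--         return f'```\n{text}\n```'
--
--     elif entity_type == 'strikethrough':
--         # ~~text~~
--         return f'~~{text}~~'
--
--     elif entity_type == 'underline':
--         # Markdown doesn't have standard underline, use HTML or just text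
--         return f'<u>{text}</u>'
--
--     elif entity_type == 'blockquote':
--         # > text
--         # Handle multiline blockquotes
--         lines = text.split('\n')
--         return '\n'.join(f'> {line}' for line in lines)
--
--     elif entity_type == 'mention':
--         # @username - keep as-is
--         return text
--
--     elif entity_type == 'hashtag':
--         # #tag - keep as-is
--         return text
--
--     elif entity_type == 'email':
--         # email@example.com - ReactMarkdown will autolink
--         return text
--
--     elif entity_type == 'spoiler':
--         # Spoiler - markdown doesn't have standard spoiler, use text
--         # (could use ||text|| for Discord-style, but not standard markdown)
--         return text
--
--     elif entity_type == 'custom_emoji':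
--         # Custom emoji - just return text representation
--         return text
--
--     else:
--         # Unknown entity type - return text as-is
--         return text
-- ===== SOURCE B (Python) =====
-- # Dispatch through a table of renderer functions instead of an if/elif chain;
-- # the multiline blockquote is built recursively with str.partition instead of
-- # split/join.
--
-- def _quote(s):
--     # recursively quote line by line: '> ' + first line, then the rest
--     head, sep, rest = s.partition('\n')
--     if sep:
--         return '> ' + head + '\n' + _quote(rest)
--     return '> ' + head
--
-- _RENDER = {
--     'text_link': lambda text, entity: '[' + text + '](' + entity.get('href', '') + ')',
--     'bold': lambda text, entity: '**' + text + '**',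
--     'italic': lambda text, entity: '*' + text + '*',
--     'code': lambda text, entity: '`' + text + '`',
--     'pre': lambda text, entity: '```\n' + text + '\n```',
--     'strikethrough': lambda text, entity: '~~' + text + '~~',
--     'underline': lambda text, entity: '<u>' + text + '</u>',
--     'blockquote': lambda text, entity: _quote(text),
-- }
--
-- def _convert_entity_to_markdown(entity_type, text, entity):
--     return _RENDER.get(entity_type, lambda text, entity: text)(text, entity)
-- ===== Notes on version B (the rewrite author's own statement) =====
-- stated objective: alternative
-- what changed: Replaced the 16-branch if/elif equality chain by a single lookup in a table of renderer closures applied to (text, entity), with all pass-through types collapsing into the lookup's default renderer, and the blockquote rebuilt recursively via str.partition instead of split/map/join.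
import Mathlib
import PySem

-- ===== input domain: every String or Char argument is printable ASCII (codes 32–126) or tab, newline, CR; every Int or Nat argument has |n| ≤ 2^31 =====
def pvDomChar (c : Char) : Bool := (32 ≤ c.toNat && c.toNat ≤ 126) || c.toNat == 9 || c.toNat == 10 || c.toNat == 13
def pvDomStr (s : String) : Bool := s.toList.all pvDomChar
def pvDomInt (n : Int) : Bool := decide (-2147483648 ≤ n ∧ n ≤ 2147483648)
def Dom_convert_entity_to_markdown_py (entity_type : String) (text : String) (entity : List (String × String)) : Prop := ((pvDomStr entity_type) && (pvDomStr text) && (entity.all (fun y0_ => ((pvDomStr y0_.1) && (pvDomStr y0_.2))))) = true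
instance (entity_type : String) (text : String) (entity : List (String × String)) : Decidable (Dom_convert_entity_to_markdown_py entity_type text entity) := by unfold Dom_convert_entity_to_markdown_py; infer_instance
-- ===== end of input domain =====

-- B dispatches through a table of renderer closures (pass-through as the lookup default)
-- and builds the blockquote recursively line by line; objective: alternative decomposition.

-- ===== PORT A =====
def convert_entity_to_markdown_py (entity_type : String) (text : String) (entity : List (String × String)) : String :=
  if entity_type == "plain" then text
  else if entity_type == "text_link" then
    let href := (PySem.Dict.mk entity).getD "href" ""
    "[" ++ text ++ "](" ++ href ++ ")"
  else if entity_type == "link" then text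
  else if entity_type == "bold" then "**" ++ text ++ "**"
  else if entity_type == "italic" then "*" ++ text ++ "*"
  else if entity_type == "code" then "`" ++ text ++ "`"
  else if entity_type == "pre" then "```\n" ++ text ++ "\n```"
  else if entity_type == "strikethrough" then "~~" ++ text ++ "~~"
  else if entity_type == "underline" then "<u>" ++ text ++ "</u>"
  else if entity_type == "blockquote" then
    let lines := (PySem.Str.split? text "\n").getD []   -- split? = some here: sep "\n" ≠ ""
    PySem.Str.join "\n" (lines.map (fun line => "> " ++ line))
  else if entity_type == "mention" then text
  else if entity_type == "hashtag" then text
  else if entity_type == "email" then text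
  else if entity_type == "spoiler" then text
  else if entity_type == "custom_emoji" then text
  else text

-- ===== PORT B =====
-- hand port of Source B's recursive _quote (str.partition('\n') = take/drop at the first
-- newline; exact on all strings), working on the code-point list
def pvQuoteChars (cs : List Char) : List Char :=
  match h : cs.dropWhile (fun c => c != '\n') with
  | [] => '>' :: ' ' :: cs.takeWhile (fun c => c != '\n')
  | _ :: t => '>' :: ' ' :: (cs.takeWhile (fun c => c != '\n') ++ '\n' :: pvQuoteChars t)
termination_by cs.length
decreasing_by
  have h1 := List.length_dropWhile_le (fun c => c != '\n') cs
  rw [h] at h1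
  simp at h1
  omega

-- the renderer table of Source B: entity type -> closure (text, entity) -> markdown
def pvRenderTable : PySem.Dict String (String → List (String × String) → String) :=
  PySem.Dict.mk [
    ("text_link", fun text entity => "[" ++ text ++ "](" ++ (PySem.Dict.mk entity).getD "href" "" ++ ")"),
    ("bold", fun text _ => "**" ++ text ++ "**"),
    ("italic", fun text _ => "*" ++ text ++ "*"),
    ("code", fun text _ => "`" ++ text ++ "`"),
    ("pre", fun text _ => "```\n" ++ text ++ "\n```"),
    ("strikethrough", fun text _ => "~~" ++ text ++ "~~"),
    ("underline", fun text _ => "<u>" ++ text ++ "</u>"),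
    ("blockquote", fun text _ => String.ofList (pvQuoteChars text.toList))]

def convert_entity_to_markdown_py_alt (entity_type : String) (text : String) (entity : List (String × String)) : String :=
  (pvRenderTable.getD entity_type (fun text _ => text)) text entity

-- ===== PRECONDITION & SPEC =====
def Spec_convert_entity_to_markdown_py (entity_type : String) (text : String) (entity : List (String × String)) (out : String) : Prop := out = convert_entity_to_markdown_py_alt entity_type text entity
instance (entity_type : String) (text : String) (entity : List (String × String)) (out : String) : Decidable (Spec_convert_entity_to_markdown_py entity_type text entity out) := by unfold Spec_convert_entity_to_markdown_py; infer_instance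

-- ===== CLAIM =====
def Claim_equal_convert_entity_to_markdown_py : Prop := ∀ (entity_type : String) (text : String) (entity : List (String × String)), Dom_convert_entity_to_markdown_py entity_type text entity → Spec_convert_entity_to_markdown_py entity_type text entity (convert_entity_to_markdown_py entity_type text entity)

-- ===== LEMMAS AND PROOFS =====

-- structural version of splitOn on '\n', used to bridge A's split/join to B's recursion
def pvSplitList : List Char → List (List Char)
  | [] => [[]]
  | c :: r => if c = '\n' then [] :: pvSplitList r else (pvSplitList r).modifyHead (c :: ·)

lemma pvSplitList_ne_nil (cs : List Char) : pvSplitList cs ≠ [] := by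
  induction cs with
  | nil => simp [pvSplitList]
  | cons c r ih =>
    simp only [pvSplitList]
    split
    · simp
    · cases hr : pvSplitList r with
      | nil => exact absurd hr ih
      | cons a l => simp [List.modifyHead]

lemma pvGo_nil (cur : List Char) (acc : List (List Char)) (fuel : Nat) :
    PySem.Chars.splitOn.go ['\n'] (fuel+1) [] cur acc = (cur.reverse :: acc).reverse := by
  rw [PySem.Chars.splitOn.go]
  omega

lemma pvGo_cons (cur : List Char) (acc : List (List Char)) (fuel : Nat) (c : Char) (rest : List Char) :
    PySem.Chars.splitOn.go ['\n'] (fuel+1) (c::rest) cur acc =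
      (if List.isPrefixOf ['\n'] (c::rest) = true
       then PySem.Chars.splitOn.go ['\n'] fuel (List.drop 1 (c::rest)) [] (cur.reverse :: acc)
       else PySem.Chars.splitOn.go ['\n'] fuel rest (c :: cur) acc) := by
  rw [PySem.Chars.splitOn.go]
  simp

lemma pvGo_spec (fuel : Nat) : ∀ (l cur : List Char) (acc : List (List Char)), l.length < fuel →
    PySem.Chars.splitOn.go ['\n'] fuel l cur acc
      = acc.reverse ++ (pvSplitList l).modifyHead (cur.reverse ++ ·) := by
  induction fuel with
  | zero => intro l cur acc h; omega
  | succ n ih =>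
    intro l cur acc h
    cases l with
    | nil => simp [pvGo_nil, pvSplitList, List.modifyHead]
    | cons c rest =>
      rw [pvGo_cons]
      by_cases hc : c = '\n'
      · subst hc
        have hp : List.isPrefixOf ['\n'] ('\n'::rest) = true := by
          simp [List.isPrefixOf]
        rw [if_pos hp]
        rw [show List.drop 1 ('\n'::rest) = rest from rfl]
        rw [ih rest [] (cur.reverse :: acc) (by simp at h ⊢; omega)]
        obtain ⟨a, l', hal⟩ : ∃ a l', pvSplitList rest = a :: l' := by
          cases hr : pvSplitList rest with
          | nil => exact absurd hr (pvSplitList_ne_nil rest)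
          | cons a l' => exact ⟨a, l', rfl⟩
        simp [pvSplitList, hal, List.modifyHead]
      · have hp : List.isPrefixOf ['\n'] (c::rest) = false := by
          simp [List.isPrefixOf]
          exact fun hh => absurd hh.symm hc
        rw [if_neg (by simp [hp])]
        rw [ih rest (c :: cur) acc (by simp at h ⊢; omega)]
        obtain ⟨a, l', hal⟩ : ∃ a l', pvSplitList rest = a :: l' := by
          cases hr : pvSplitList rest with
          | nil => exact absurd hr (pvSplitList_ne_nil rest)
          | cons a l' => exact ⟨a, l', rfl⟩
        simp [pvSplitList, hc, hal, List.modifyHead]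

lemma pvSplitOn_eq (cs : List Char) : PySem.Chars.splitOn cs ['\n'] = pvSplitList cs := by
  unfold PySem.Chars.splitOn
  rw [pvGo_spec (cs.length + 1) cs [] [] (by omega)]
  obtain ⟨a, l', hal⟩ : ∃ a l', pvSplitList cs = a :: l' := by
    cases hr : pvSplitList cs with
    | nil => exact absurd hr (pvSplitList_ne_nil cs)
    | cons a l' => exact ⟨a, l', rfl⟩
  simp [hal, List.modifyHead]

lemma pvSplitList_structure (cs : List Char) :
    pvSplitList cs =
      (match cs.dropWhile (fun c => c != '\n') with
       | [] => [cs.takeWhile (fun c => c != '\n')]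
       | _ :: t => cs.takeWhile (fun c => c != '\n') :: pvSplitList t) := by
  induction cs with
  | nil => simp [pvSplitList]
  | cons c r ih =>
    by_cases hc : c = '\n'
    · subst hc
      simp [pvSplitList, List.dropWhile, List.takeWhile]
    · have hpred : (c != '\n') = true := by simp [hc]
      simp only [List.dropWhile_cons, List.takeWhile_cons, hpred, if_true]
      simp only [pvSplitList, if_neg hc]
      rw [ih]
      cases hd : r.dropWhile (fun c => c != '\n') with
      | nil => simp [List.modifyHead]
      | cons x t => simp [List.modifyHead]

lemma pvQuote_join (n : Nat) : ∀ (cs : List Char), cs.length ≤ n →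
    PySem.Chars.join ['\n'] ((pvSplitList cs).map (fun p => '>' :: ' ' :: p)) = pvQuoteChars cs := by
  induction n with
  | zero =>
    intro cs h
    have : cs = [] := by cases cs <;> simp_all
    subst this
    simp [pvSplitList, pvQuoteChars, PySem.Chars.join_singleton]
  | succ n ih =>
    intro cs h
    rw [pvSplitList_structure]
    cases hd : cs.dropWhile (fun c => c != '\n') with
    | nil =>
      simp only [hd]
      rw [pvQuoteChars]
      split
      · simp [PySem.Chars.join_singleton]
      · rename_i heq
        simp [hd] at heq
    | cons x t =>
      have hlen : t.length < cs.length := by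
        have h1 := List.length_dropWhile_le (fun c => c != '\n') cs
        rw [hd] at h1
        simp at h1
        omega
      obtain ⟨a, l', hal⟩ : ∃ a l', pvSplitList t = a :: l' := by
        cases hr : pvSplitList t with
        | nil => exact absurd hr (pvSplitList_ne_nil t)
        | cons a l' => exact ⟨a, l', rfl⟩
      simp only [hd]
      rw [pvQuoteChars]
      split
      · rename_i heq
        simp [hd] at heq
      · rename_i y s heq
        rw [hd] at heq
        injection heq with h1 h2
        subst h2
        have hj := ih t (by omega)
        rw [hal, List.map_cons] at hj
        rw [hal]
        simp only [List.map_cons, PySem.Chars.join_cons_cons, hj]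
        simp

lemma pvBlockquote_eq (text : String) :
    PySem.Str.join "\n" (((PySem.Str.split? text "\n").getD []).map (fun line => "> " ++ line))
      = String.ofList (pvQuoteChars text.toList) := by
  have hsplit : PySem.Str.split? text "\n" = some ((pvSplitList text.toList).map String.ofList) := by
    unfold PySem.Str.split?
    simp [PySem.Chars.split?, pvSplitOn_eq]
  rw [hsplit]
  have htl : ∀ s t : String, s.toList = t.toList → s = t := by
    intro s t hh
    have := congrArg String.ofList hh
    simpa using this
  apply htl
  rw [PySem.Str.toList_join]
  simp only [Option.getD_some, List.map_map]
  rw [show (String.toList ∘ (fun line => "> " ++ line) ∘ String.ofList) = (fun p : List Char => '>' :: ' ' :: p) from by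
    funext p; simp]
  rw [show "\n".toList = ['\n'] from rfl]
  rw [pvQuote_join (text.toList.length) text.toList (le_refl _)]
  simp

-- ===== VERDICT =====
theorem convert_entity_to_markdown_py_spec : Claim_equal_convert_entity_to_markdown_py := by
  intro entity_type text entity hdom
  clear hdom
  unfold Spec_convert_entity_to_markdown_py convert_entity_to_markdown_py convert_entity_to_markdown_py_alt pvRenderTable
  by_cases h1 : entity_type = "plain"
  · subst h1; simp [PySem.Dict.getD_eq_get?_getD, PySem.Dict.get?]
  by_cases h2 : entity_type = "text_link"
  · subst h2; simp [PySem.Dict.getD_eq_get?_getD, PySem.Dict.get?]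
  by_cases h3 : entity_type = "link"
  · subst h3; simp [PySem.Dict.getD_eq_get?_getD, PySem.Dict.get?]
  by_cases h4 : entity_type = "bold"
  · subst h4; simp [PySem.Dict.getD_eq_get?_getD, PySem.Dict.get?]
  by_cases h5 : entity_type = "italic"
  · subst h5; simp [PySem.Dict.getD_eq_get?_getD, PySem.Dict.get?]
  by_cases h6 : entity_type = "code"
  · subst h6; simp [PySem.Dict.getD_eq_get?_getD, PySem.Dict.get?]
  by_cases h7 : entity_type = "pre"
  · subst h7; simp [PySem.Dict.getD_eq_get?_getD, PySem.Dict.get?]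
  by_cases h8 : entity_type = "strikethrough"
  · subst h8; simp [PySem.Dict.getD_eq_get?_getD, PySem.Dict.get?]
  by_cases h9 : entity_type = "underline"
  · subst h9; simp [PySem.Dict.getD_eq_get?_getD, PySem.Dict.get?]
  by_cases h10 : entity_type = "blockquote"
  · subst h10
    simp [PySem.Dict.getD_eq_get?_getD, PySem.Dict.get?]
    exact pvBlockquote_eq text
  by_cases h11 : entity_type = "mention"
  · subst h11; simp [PySem.Dict.getD_eq_get?_getD, PySem.Dict.get?]
  by_cases h12 : entity_type = "hashtag"
  · subst h12; simp [PySem.Dict.getD_eq_get?_getD, PySem.Dict.get?]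
  by_cases h13 : entity_type = "email"
  · subst h13; simp [PySem.Dict.getD_eq_get?_getD, PySem.Dict.get?]
  by_cases h14 : entity_type = "spoiler"
  · subst h14; simp [PySem.Dict.getD_eq_get?_getD, PySem.Dict.get?]
  by_cases h15 : entity_type = "custom_emoji"
  · subst h15; simp [PySem.Dict.getD_eq_get?_getD, PySem.Dict.get?]
  · simp [PySem.Dict.getD_eq_get?_getD,
      Ne.symm h2, Ne.symm h4, Ne.symm h5, Ne.symm h6, Ne.symm h7, Ne.symm h8, Ne.symm h9, Ne.symm h10,
      h1, h2, h3, h4, h5, h6, h7, h8, h9, h10, h11, h12, h13, h14, h15, PySem.Dict.get?]
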